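-- pv_equiv track=rewrite | github.com/Roland778ad/Turtle-Party | BAM_codes/my_heartrate_project.py | is_peak_at
-- ===== SOURCE A (Python) =====
-- def is_peak_at(sec, w):
--     if sec < w or sec >= len(data)-w:
--         return False
--     for x in range(1, w + 1):
--         if data[sec] > data[sec - x] and data[sec] >= data[sec + x]:
--             continue
--         else:
--             return False
--     return True
--
-- data = [149, 151, 155, 150, 153, 152, 155, 155, 155, 154, 165, 164, 175, 172, 168]
--
-- w = 2
-- ===== SOURCE B (Python) =====
-- data = [149, 151, 155, 150, 153, 152, 155, 155, 155, 154, 165, 164, 175, 172, 168]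
--
-- w = 2
--
-- def is_peak_at(sec, w):
--     if sec < w or sec >= len(data) - w:
--         return False
--     window = data[sec - w: sec + w + 1]
--     m = max(window)
--     return data[sec] == m and window.index(m) == w
-- ===== Notes on version B (the rewrite author's own statement) =====
-- stated objective: alternative
-- what changed: Instead of A's pairwise left/right comparison loop, B takes the single combined window data[sec-w:sec+w+1], computes its maximum once, and decides peakhood by a first-occurrence test: data[sec] equals the window max and the FIRST index of that max in the window is w (first occurrence at the centre encodes exactly 'strictly greater than everything left, >= everything right'); …
-- outside the precondition, e.g. on is_peak_at(7, -1): A returns True, B raises ValueError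
import Mathlib
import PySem

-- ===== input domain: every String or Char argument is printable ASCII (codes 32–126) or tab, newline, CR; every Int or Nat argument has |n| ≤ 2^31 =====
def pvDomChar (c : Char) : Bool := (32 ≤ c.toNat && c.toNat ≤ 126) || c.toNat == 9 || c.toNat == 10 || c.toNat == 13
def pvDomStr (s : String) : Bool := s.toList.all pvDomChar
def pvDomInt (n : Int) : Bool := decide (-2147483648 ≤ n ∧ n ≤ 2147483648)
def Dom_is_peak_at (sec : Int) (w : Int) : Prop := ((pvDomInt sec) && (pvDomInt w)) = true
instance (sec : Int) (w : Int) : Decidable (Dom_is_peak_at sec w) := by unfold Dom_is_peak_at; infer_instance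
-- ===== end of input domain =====

-- ===== PORT A =====
-- B replaces A's pairwise left/right comparison loop by a single-window max plus a
-- first-occurrence index test (objective: alternative, same cost).
-- the module-level constant `data` from the Python file
def pvData : List Int := [149, 151, 155, 150, 153, 152, 155, 155, 155, 154, 165, 164, 175, 172, 168]

-- the 'for x in range(1, w+1)' loop with its early 'return False'; inside the loop the
-- indices sec, sec-x, sec+x are always in range (guard + 1 <= x <= w), so pyGetD is exact there
def isPeakAtLoop (sec : Int) : List Int → Bool
  | [] => true
  | x :: rest =>
    if PySem.List.pyGetD pvData sec 0 > PySem.List.pyGetD pvData (sec - x) 0 &&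
       PySem.List.pyGetD pvData sec 0 ≥ PySem.List.pyGetD pvData (sec + x) 0 then
      isPeakAtLoop sec rest
    else
      false

def is_peak_at (sec : Int) (w : Int) : Bool :=
  if sec < w ∨ sec ≥ 15 - w then false   -- len(data) = 15
  else isPeakAtLoop sec (PySem.List.pyRange 1 (w + 1) 1)

-- ===== PORT B =====
def is_peak_at_alt (sec : Int) (w : Int) : Bool :=
  if sec < w ∨ sec ≥ 15 - w then false
  else
    let window := PySem.List.slice pvData (some (sec - w)) (some (sec + w + 1))
    match PySem.List.max? window (fun y => y) with
    | some m =>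
        decide (PySem.List.pyGetD pvData sec 0 = m) &&
        ((PySem.List.index? window m).map Int.ofNat == some w)
    | none => false   -- Python's max() raises ValueError on an empty window; outside Pre_

-- ===== PRECONDITION & SPEC =====
-- Pre_ restricts to the natural domain of non-negative window widths (plus every guard-rejected
-- input): for w < 0 with the guard passing the window is degenerate — A vacuously returns True
-- while B's max() on the empty slice raises ValueError.
def Pre_is_peak_at (sec : Int) (w : Int) : Prop := 0 ≤ w ∨ sec < w ∨ sec ≥ 15 - w
instance (sec : Int) (w : Int) : Decidable (Pre_is_peak_at sec w) := by unfold Pre_is_peak_at; infer_instance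
def pvWitness_is_peak_at : Int × Int := (5, 2)

def Spec_is_peak_at (sec : Int) (w : Int) (out : Bool) : Prop := out = is_peak_at_alt sec w
instance (sec : Int) (w : Int) (out : Bool) : Decidable (Spec_is_peak_at sec w out) := by unfold Spec_is_peak_at; infer_instance

-- ===== CLAIM (what is proved, stated in full; the proofs are below) =====
def Claim_equal_is_peak_at : Prop := ∀ (sec : Int) (w : Int), Dom_is_peak_at sec w → Pre_is_peak_at sec w → Spec_is_peak_at sec w (is_peak_at sec w)

-- ===== LEMMAS AND PROOFS =====

-- ===== VERDICT (by name: the statement is the Claim_ definition above) =====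
theorem is_peak_at_spec : Claim_equal_is_peak_at := by
  intro sec w _ hpre
  unfold Spec_is_peak_at
  by_cases hg : sec < w ∨ sec ≥ 15 - w
  · unfold is_peak_at is_peak_at_alt
    rw [if_pos hg, if_pos hg]
  · have h1 : w ≤ sec ∧ sec < 15 - w := by omega
    have h2 : 0 ≤ w := by rcases hpre with h | h | h <;> omega
    have hw : 0 ≤ w ∧ w ≤ 7 := by omega
    have hs : 0 ≤ sec ∧ sec ≤ 14 := by omega
    obtain ⟨hw1, hw2⟩ := hw
    obtain ⟨hs1, hs2⟩ := hs
    interval_cases w <;> interval_cases sec <;> decide
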